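-- pv_equiv track=rewrite | github.com/simeonul/barcode_reader_service | scanners/decoding_util.py | row_to_lengths_array
-- ===== SOURCE A (Python) =====
-- def row_to_lengths_array(row):
--     lengths = []
--     current_digit = row[0]
--     current_length = 1
--     for i in range(1, len(row)):
--         if row[i] == current_digit:
--             current_length += 1
--         else:
--             lengths.append(current_length)
--             current_digit = row[i]
--             current_length = 1
--     lengths.pop(0)
--     return lengths[3:27], lengths[32:56]
-- ===== SOURCE B (Python) =====
-- def row_to_lengths_array(row):
--     n = len(row)
--     bounds = [0] + [i for i in range(1, n) if row[i] != row[i - 1]] + [n]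
--     runs = [bounds[j + 1] - bounds[j] for j in range(len(bounds) - 1)]
--     mid = runs[1:-1]
--     return mid[3:27], mid[32:56]
-- ===== Notes on version B (the rewrite author's own statement) =====
-- stated objective: alternative
-- what changed: Instead of A's running-state loop (current digit, current length, append on change), B collects the transition boundary indices, forms all run lengths as consecutive differences of the boundary list, and slices off the first and last run; same O(n) cost, different decomposition.
import Mathlib
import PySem

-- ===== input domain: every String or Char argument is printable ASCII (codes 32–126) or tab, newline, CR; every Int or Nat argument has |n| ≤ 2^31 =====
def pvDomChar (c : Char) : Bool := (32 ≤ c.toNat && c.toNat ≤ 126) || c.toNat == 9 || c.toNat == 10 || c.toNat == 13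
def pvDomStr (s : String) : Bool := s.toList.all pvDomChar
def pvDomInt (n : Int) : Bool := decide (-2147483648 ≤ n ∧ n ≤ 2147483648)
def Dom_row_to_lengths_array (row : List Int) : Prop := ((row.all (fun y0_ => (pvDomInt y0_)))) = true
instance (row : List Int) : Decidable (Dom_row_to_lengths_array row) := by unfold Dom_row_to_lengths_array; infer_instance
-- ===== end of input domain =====

-- B collects transition boundary indices and takes consecutive differences instead of
-- A's running (current digit, current length) accumulator loop; same O(n) cost ('alternative').

-- ===== PORT A =====
-- loop body of A's for-loop (state = (lengths, current_digit, current_length))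
def pvStepA (row : List Int) (st : List Int × Int × Int) (i : Int) : List Int × Int × Int :=
  if PySem.List.pyGetD row i 0 == st.2.1 then (st.1, st.2.1, st.2.2 + 1)
  else (st.1 ++ [st.2.2], PySem.List.pyGetD row i 0, 1)

def row_to_lengths_array (row : List Int) : List Int × List Int :=
  match PySem.List.pyGet? row 0 with
  | none => ([], [])  -- IndexError at row[0]: excluded by Pre_
  | some d0 =>
    let st := (PySem.List.pyRange 1 (row.length : Int) 1).foldl (pvStepA row) ([], d0, 1)
    match PySem.List.pop? st.1 0 with
    | none => ([], [])  -- IndexError at lengths.pop(0): excluded by Pre_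
    | some (_, lengths) =>
        (PySem.List.slice lengths (some 3) (some 27),
         PySem.List.slice lengths (some 32) (some 56))

-- ===== PORT B =====
-- 'row[i] != row[i - 1]' of B's boundary comprehension
def pvTrans (row : List Int) (i : Int) : Bool :=
  PySem.List.pyGetD row i 0 != PySem.List.pyGetD row (i - 1) 0

def row_to_lengths_array_alt (row : List Int) : List Int × List Int :=
  let n : Int := row.length
  let bounds : List Int := 0 :: ((PySem.List.pyRange 1 n 1).filter (pvTrans row) ++ [n])
  let runs : List Int := (PySem.List.pyRange 0 ((bounds.length : Int) - 1) 1).map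
      (fun j => PySem.List.pyGetD bounds (j + 1) 0 - PySem.List.pyGetD bounds j 0)
  let mid := PySem.List.slice runs (some 1) (some (-1))
  (PySem.List.slice mid (some 3) (some 27), PySem.List.slice mid (some 32) (some 56))

-- ===== PRECONDITION & SPEC =====
-- Pre_ excludes exactly the inputs where A raises IndexError: the empty row (row[0])
-- and the constant row (lengths.pop(0) on the empty list).
def Pre_row_to_lengths_array (row : List Int) : Prop :=
  row ≠ [] ∧ ¬ List.IsChain (fun a b : Int => a = b) row
instance (row : List Int) : Decidable (Pre_row_to_lengths_array row) := by
  unfold Pre_row_to_lengths_array; infer_instance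

def pvWitness_row_to_lengths_array : List Int := [0, 1]

def Spec_row_to_lengths_array (row : List Int) (out : List Int × List Int) : Prop :=
  out = row_to_lengths_array_alt row
instance (row : List Int) (out : List Int × List Int) : Decidable (Spec_row_to_lengths_array row out) := by
  unfold Spec_row_to_lengths_array; infer_instance

-- ===== CLAIM (what is proved, stated in full; the proofs are below) =====
def Claim_equal_row_to_lengths_array : Prop :=
  ∀ (row : List Int), Dom_row_to_lengths_array row → Pre_row_to_lengths_array row →
    Spec_row_to_lengths_array row (row_to_lengths_array row)

-- ===== LEMMAS AND PROOFS =====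

/-- consecutive differences of a boundary list -/
def pvDiffs : List Int → List Int
  | b :: c :: rest => (c - b) :: pvDiffs (c :: rest)
  | _ => []

theorem pvDiffs_append : ∀ (l : List Int) (x : Int) (h : l ≠ []),
    pvDiffs (l ++ [x]) = pvDiffs l ++ [x - l.getLastD 0]
  | [a], x, _ => by simp [pvDiffs]
  | a :: b :: t, x, h => by
    have ih := pvDiffs_append (b :: t) x (by simp)
    simp only [List.cons_append, pvDiffs] at ih ⊢
    rw [ih]
    simp

theorem pvMapRangeDiffs : ∀ (l : List Int) (a : Int),
    (List.range l.length).map (fun k => (a :: l).getD (k + 1) 0 - (a :: l).getD k 0)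
      = pvDiffs (a :: l)
  | [], a => by simp [pvDiffs]
  | b :: t, a => by
    have ih := pvMapRangeDiffs t b
    simp only [List.length_cons, List.range_succ_eq_map, List.map_cons, List.map_map,
               Function.comp_def, pvDiffs]
    refine List.cons_eq_cons.mpr ⟨by simp [List.getD], ?_⟩
    rw [← ih]
    apply List.map_congr_left
    intro k _
    simp [List.getD]

-- transitions seen so far (after processing range(1, m))
def pvT (row : List Int) (m : Nat) : List Int :=
  (PySem.List.pyRange 1 (m : Int) 1).filter (pvTrans row)

theorem pvInv (row : List Int) (m : Nat) (h1 : 1 ≤ m) (h2 : m ≤ row.length) :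
    (PySem.List.pyRange 1 (m : Int) 1).foldl (pvStepA row) ([], row.getD 0 0, 1)
      = (pvDiffs (0 :: pvT row m), row.getD (m - 1) 0,
         (m : Int) - (0 :: pvT row m).getLastD 0) := by
  induction m with
  | zero => omega
  | succ m ih =>
    by_cases hm : m = 0
    · subst hm
      simp [pvT, PySem.List.pyRange_one_eq_nil, pvDiffs]
    · have h1m : 1 ≤ m := by omega
      have h2m : m ≤ row.length := by omega
      have ihv := ih h1m h2m
      have hsplit : PySem.List.pyRange 1 ((m + 1 : Nat) : Int) 1
          = PySem.List.pyRange 1 (m : Int) 1 ++ [(m : Int)] := by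
        have hc : ((m + 1 : Nat) : Int) = (m : Int) + 1 := by push_cast; ring
        rw [hc, PySem.List.pyRange_one_succ_right (by exact_mod_cast h1m)]
      have hTs : pvT row (m + 1)
          = pvT row m ++ if pvTrans row (m : Int) then [(m : Int)] else [] := by
        simp only [pvT, hsplit, List.filter_append, List.filter]
        split <;> simp_all
      have hget : PySem.List.pyGetD row ((m : Int)) 0 = row.getD m 0 :=
        PySem.List.pyGetD_natCast row m 0
      have hgetp : PySem.List.pyGetD row ((m : Int) - 1) 0 = row.getD (m - 1) 0 := by
        have hc : ((m : Int) - 1) = ((m - 1 : Nat) : Int) := by omega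
        rw [hc, PySem.List.pyGetD_natCast]
      have htr : pvTrans row (m : Int) = (row.getD m 0 != row.getD (m - 1) 0) := by
        simp [pvTrans, hget, hgetp]
      rw [hsplit, List.foldl_append, ihv]
      simp only [List.foldl_cons, List.foldl_nil]
      by_cases heq : row.getD m 0 = row.getD (m - 1) 0
      · have htr0 : pvTrans row (m : Int) = false := by
          rw [htr]; simp only [bne_eq_false_iff_eq, beq_iff_eq]; exact heq
        have hT : pvT row (m + 1) = pvT row m := by
          rw [hTs, htr0]; simp
      -- step keeps the run: lengths, boundaries unchanged, length grows by one
        simp only [pvStepA, hget]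
        rw [if_pos (by rw [heq]; exact beq_self_eq_true _)]
        rw [hT]
        refine Prod.ext (by simp) (Prod.ext ?_ ?_)
        · simp only [Nat.add_sub_cancel]
          exact heq.symm
        · simp only
          push_cast; ring
      · have htr' : pvTrans row (m : Int) = true := by simp [htr]; exact heq
        have hT : pvT row (m + 1) = pvT row m ++ [(m : Int)] := by rw [hTs, htr']; simp
        simp only [pvStepA, hget]
        rw [if_neg (by simp only [beq_iff_eq]; exact heq)]
        rw [hT]
        have hcons : (0 : Int) :: (pvT row m ++ [(m : Int)])
            = (0 :: pvT row m) ++ [(m : Int)] := by simp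
        refine Prod.ext ?_ (Prod.ext ?_ ?_)
        · simp only
          rw [hcons, pvDiffs_append (0 :: pvT row m) (m : Int) (by simp)]
        · simp only [Nat.add_sub_cancel]
        · simp only
          rw [hcons, List.getLastD_concat]
          push_cast; ring

theorem pvT_ne_nil (row : List Int) (h1 : row ≠ [])
    (h2 : ¬ List.IsChain (fun a b : Int => a = b) row) : pvT row row.length ≠ [] := by
  intro hnil
  apply h2
  rw [List.isChain_iff_getElem]
  intro k hk
  by_contra hne
  have hmem : ((k + 1 : Nat) : Int) ∈ PySem.List.pyRange 1 (row.length : Int) 1 := by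
    rw [PySem.List.mem_pyRange_one]
    constructor
    · omega
    · exact_mod_cast hk
  have hfil := List.filter_eq_nil_iff.1 hnil ((k + 1 : Nat) : Int) hmem
  apply hfil
  have hge : PySem.List.pyGetD row ((k + 1 : Nat) : Int) 0 = row.getD (k + 1) 0 :=
    PySem.List.pyGetD_natCast row (k + 1) 0
  have hgp : PySem.List.pyGetD row (((k + 1 : Nat) : Int) - 1) 0 = row.getD k 0 := by
    have hc : (((k + 1 : Nat) : Int) - 1) = ((k : Nat) : Int) := by omega
    rw [hc, PySem.List.pyGetD_natCast]
  simp only [pvTrans, hge, hgp, bne_iff_ne, ne_eq]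
  rw [List.getD_eq_getElem _ _ (by omega), List.getD_eq_getElem _ _ (by omega)]
  intro hc
  exact hne hc.symm

theorem pvSlice_one_neg_one (xs : List Int) :
    PySem.List.slice xs (some 1) (some (-1)) = xs.tail.dropLast := by
  simp only [PySem.List.slice, PySem.List.clampIdx_neg_one]
  cases xs with
  | nil => simp
  | cons a t => simp [List.dropLast_eq_take]

theorem pvRunsEq (a : Int) (l : List Int) :
    (PySem.List.pyRange 0 ((l.length : Nat) : Int) 1).map
        (fun j => PySem.List.pyGetD (a :: l) (j + 1) 0 - PySem.List.pyGetD (a :: l) j 0)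
      = pvDiffs (a :: l) := by
  rw [PySem.List.pyRange_zero_nat, List.map_map, ← pvMapRangeDiffs l a]
  apply List.map_congr_left
  intro k _
  simp only [Function.comp_apply]
  have h1 : ((k : Int) + 1) = ((k + 1 : Nat) : Int) := by push_cast; ring
  rw [h1, PySem.List.pyGetD_natCast, PySem.List.pyGetD_natCast]

-- ===== VERDICT (by name: the statement is the Claim_ definition above) =====
theorem row_to_lengths_array_spec : Claim_equal_row_to_lengths_array := by
  unfold Claim_equal_row_to_lengths_array
  intro row _ hpre
  obtain ⟨hne, hch⟩ := hpre
  unfold Spec_row_to_lengths_array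
  have hn1 : 1 ≤ row.length := List.length_pos_of_ne_nil hne
  have hTne := pvT_ne_nil row hne hch
  obtain ⟨t0, T', hT⟩ := List.exists_cons_of_ne_nil hTne
  -- A's side: reduce via the loop invariant
  obtain ⟨d, rest, hrow⟩ := List.exists_cons_of_ne_nil hne
  have hd0 : row.getD 0 0 = d := by rw [hrow]; rfl
  have hA : row_to_lengths_array row
      = (PySem.List.slice (pvDiffs (t0 :: T')) (some 3) (some 27),
         PySem.List.slice (pvDiffs (t0 :: T')) (some 32) (some 56)) := by
    conv_lhs => rw [hrow]
    show (match PySem.List.pyGet? (d :: rest) 0 with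
      | none => ([], [])
      | some d0 =>
        let st := (PySem.List.pyRange 1 ((d :: rest).length : Int) 1).foldl
          (pvStepA (d :: rest)) ([], d0, 1)
        match PySem.List.pop? st.1 0 with
        | none => ([], [])
        | some (_, lengths) =>
            (PySem.List.slice lengths (some 3) (some 27),
             PySem.List.slice lengths (some 32) (some 56))) = _
    rw [PySem.List.pyGet?_zero_cons]
    simp only
    rw [← hrow, ← hd0, pvInv row row.length hn1 le_rfl]
    simp only [hT, pvDiffs]
    rw [PySem.List.pop?_zero_cons]
  rw [hA]
  -- B's side
  show _ = (let n : Int := row.length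
    let bounds : List Int := 0 :: ((PySem.List.pyRange 1 n 1).filter (pvTrans row) ++ [n])
    let runs : List Int := (PySem.List.pyRange 0 ((bounds.length : Int) - 1) 1).map
        (fun j => PySem.List.pyGetD bounds (j + 1) 0 - PySem.List.pyGetD bounds j 0)
    let mid := PySem.List.slice runs (some 1) (some (-1))
    (PySem.List.slice mid (some 3) (some 27), PySem.List.slice mid (some 32) (some 56)))
  have hfil : (PySem.List.pyRange 1 ((row.length : Nat) : Int) 1).filter (pvTrans row)
      = pvT row row.length := rfl
  simp only [hfil, hT]
  have hlen : (((0 : Int) :: ((t0 :: T') ++ [(row.length : Int)])).length : Int) - 1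
      = ((((t0 :: T') ++ [(row.length : Int)]).length : Nat) : Int) := by
    simp
  rw [hlen, pvRunsEq 0 ((t0 :: T') ++ [(row.length : Int)])]
  have hsplitD : pvDiffs ((0 : Int) :: ((t0 :: T') ++ [(row.length : Int)]))
      = pvDiffs (0 :: t0 :: T')
        ++ [(row.length : Int) - (0 :: t0 :: T').getLastD 0] := by
    have hc : (0 : Int) :: ((t0 :: T') ++ [(row.length : Int)])
        = (0 :: t0 :: T') ++ [(row.length : Int)] := by simp
    rw [hc, pvDiffs_append (0 :: t0 :: T') _ (by simp)]
  rw [hsplitD, pvSlice_one_neg_one]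
  simp only [pvDiffs, List.cons_append, List.tail_cons, List.dropLast_concat]
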